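-- pv_equiv track=rewrite | github.com/naseeihity/leetcode-daily | dp/1156.swap-for-longest-repeated-character-substring.py | count
-- ===== SOURCE A (Python) =====
-- def count(c, text):
--     ans = 0
--     f, g = 0, 0
--
--     for i in range(len(text)):
--         if c == text[i]:
--             f += 1
--             g += 1
--         else:
--             f = g+1
--             g = 0
--
--         ans = max(ans, f, g)
--     return ans
-- ===== SOURCE B (Python) =====
-- def count(c, text):
--     ans = 0
--     lo = 0
--     last_bad = -1  # index of the mismatch currently inside the window, or -1
--     for hi in range(len(text)):
--         if text[hi] != c:
--             if last_bad >= lo:   # window already holds one mismatch: drop it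
--                 lo = last_bad + 1
--             last_bad = hi
--         if hi - lo + 1 > ans:
--             ans = hi - lo + 1
--     return ans
-- ===== Notes on version B (the rewrite author's own statement) =====
-- stated objective: alternative
-- what changed: Replaced A's f/g best-suffix-length recurrence with a two-pointer sliding window that keeps the left bound and the index of the single tolerated mismatch, jumping the left bound past the old mismatch when a second one enters.
import Mathlib
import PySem

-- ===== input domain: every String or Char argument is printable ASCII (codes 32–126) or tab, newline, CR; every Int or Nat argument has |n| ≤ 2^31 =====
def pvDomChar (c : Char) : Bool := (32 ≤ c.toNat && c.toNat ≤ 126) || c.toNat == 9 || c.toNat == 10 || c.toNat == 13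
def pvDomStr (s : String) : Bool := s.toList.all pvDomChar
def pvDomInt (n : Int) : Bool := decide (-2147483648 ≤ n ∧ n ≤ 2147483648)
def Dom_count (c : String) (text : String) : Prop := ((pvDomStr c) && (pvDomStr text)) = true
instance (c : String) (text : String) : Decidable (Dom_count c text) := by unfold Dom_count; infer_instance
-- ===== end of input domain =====

-- B replaces A's f/g length recurrence by a two-pointer window (left bound + index of the
-- one tolerated mismatch); same O(n) cost, alternative algorithm.

-- ===== PORT A =====
-- state (ans, f, g); for i in range(len(text)): update f,g by the recurrence, ans = max(ans,f,g)
def count (c : String) (text : String) : Int :=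
  (text.toList.foldl
    (fun (s : Int × Int × Int) (ch : Char) =>
      let ans := s.1; let f := s.2.1; let g := s.2.2
      if c == String.ofList [ch] then
        (max (max ans (f + 1)) (g + 1), f + 1, g + 1)
      else
        (max (max ans (g + 1)) 0, g + 1, 0))
    (0, 0, 0)).1

-- ===== PORT B =====
-- state (ans, lo, last_bad); for hi, ch in enumerate(text): slide the window, keep the best width
def count_alt (c : String) (text : String) : Int :=
  ((PySem.List.enumerate text.toList).foldl
    (fun (s : Int × Int × Int) (p : Int × Char) =>
      let ans := s.1; let lo := s.2.1; let lastBad := s.2.2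
      let hi := p.1
      if String.ofList [p.2] != c then
        let lo' := if lastBad ≥ lo then lastBad + 1 else lo
        (if hi - lo' + 1 > ans then hi - lo' + 1 else ans, lo', hi)
      else
        (if hi - lo + 1 > ans then hi - lo + 1 else ans, lo, lastBad))
    (0, 0, -1)).1

-- ===== PRECONDITION & SPEC =====
def Spec_count (c : String) (text : String) (out : Int) : Prop := out = count_alt c text
instance (c : String) (text : String) (out : Int) : Decidable (Spec_count c text out) := by unfold Spec_count; infer_instance

-- ===== CLAIM (what is proved, stated in full; the proofs are below) =====
def Claim_equal_count : Prop := ∀ (c : String) (text : String), Dom_count c text → Spec_count c text (count c text)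

-- ===== LEMMAS AND PROOFS =====

-- Invariant linking A's state (ansA, f, g) to B's state (ansB, lo, lb) at position k:
-- f = k - lo, g = k - 1 - lb, equal answers, lo - 1 ≤ lb ≤ k - 1, 0 ≤ lo.
theorem count_loop_eq (c : String) (l : List Char) (k : Int)
    (ansA f g ansB lo lb : Int)
    (h1 : f = k - lo) (h2 : g = k - 1 - lb) (h3 : ansA = ansB)
    (h4 : lo - 1 ≤ lb) (h5 : lb ≤ k - 1) (h6 : 0 ≤ lo) :
    (l.foldl
      (fun (s : Int × Int × Int) (ch : Char) =>
        let ans := s.1; let f := s.2.1; let g := s.2.2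
        if c == String.ofList [ch] then
          (max (max ans (f + 1)) (g + 1), f + 1, g + 1)
        else
          (max (max ans (g + 1)) 0, g + 1, 0))
      (ansA, f, g)).1
    = ((PySem.List.enumerate l k).foldl
      (fun (s : Int × Int × Int) (p : Int × Char) =>
        let ans := s.1; let lo := s.2.1; let lastBad := s.2.2
        let hi := p.1
        if String.ofList [p.2] != c then
          let lo' := if lastBad ≥ lo then lastBad + 1 else lo
          (if hi - lo' + 1 > ans then hi - lo' + 1 else ans, lo', hi)
        else
          (if hi - lo + 1 > ans then hi - lo + 1 else ans, lo, lastBad))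
      (ansB, lo, lb)).1 := by
  induction l generalizing k ansA f g ansB lo lb with
  | nil => simpa [PySem.List.enumerate] using h3
  | cons ch t ih =>
    rw [PySem.List.enumerate_cons]
    simp only [List.foldl_cons]
    by_cases hm : c == String.ofList [ch]
    · have hm' : (String.ofList [ch] != c) = false := by
        simp only [bne, beq_iff_eq] at *
        simp [hm]
      simp only [hm, if_true, hm', Bool.false_eq_true, if_false]
      exact ih (k + 1) _ _ _ _ _ _ (by omega) (by omega) (by omega) h4 (by omega) h6
    · have hm0 : (c == String.ofList [ch]) = false := by simpa using hm
      have hm' : (String.ofList [ch] != c) = true := by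
        simp only [beq_iff_eq] at hm
        simp only [bne_iff_ne]; exact Ne.symm hm
      simp only [hm0, Bool.false_eq_true, if_false, hm', if_true]
      by_cases hlb : lb ≥ lo
      · simp only [hlb, if_true]
        exact ih (k + 1) _ _ _ _ _ _ (by omega) (by omega) (by omega) (by omega) (by omega)
          (by omega)
      · simp only [hlb, if_false]
        exact ih (k + 1) _ _ _ _ _ _ (by omega) (by omega) (by omega) (by omega) (by omega) h6

-- ===== VERDICT (by name: the statement is the Claim_ definition above) =====
theorem count_spec : Claim_equal_count := by
  intro c text _
  unfold Spec_count count count_alt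
  exact count_loop_eq c text.toList 0 0 0 0 0 0 (-1)
    rfl rfl rfl (by omega) (by omega) (by omega)
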